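-- pv_equiv track=rewrite | github.com/paketb0te/advent-of-code | 2023/02/solve.py | draws_are_possible
-- ===== SOURCE A (Python) =====
-- def draws_are_possible(
--     draws: list[dict[str, int]], given_cubes: dict[str, int]
-- ) -> bool:
--     maxima = get_color_maxima_from_draws(draws)
--
--     for color, count in maxima.items():
--         if count > given_cubes.get(color, 0):
--             return False
--
--     return True
--
-- def get_color_maxima_from_draws(draws: list[dict[str, int]]) -> dict[str, int]:
--     maxima: dict[str, int] = {}
--     for draw in draws:
--         for color, count in draw.items():
--             if count > maxima.get(color, 0):
--                 maxima[color] = count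
--     return maxima
-- ===== SOURCE B (Python) =====
-- def draws_are_possible(
--     draws: list[dict[str, int]], given_cubes: dict[str, int]
-- ) -> bool:
--     # Single fused pass: no maxima table. A positive requirement that exceeds
--     # the given cubes makes the draws impossible; non-positive counts are no
--     # requirement at all (they never enter A's maxima dict either).
--     return all(
--         count <= given_cubes.get(color, 0)
--         for draw in draws
--         for color, count in draw.items()
--         if count > 0
--     )
-- ===== Notes on version B (the rewrite author's own statement) =====
-- stated objective: simpler
-- what changed: B drops the get_color_maxima_from_draws helper and the intermediate maxima dict entirely: one fused all(...) pass checks every positive (color, count) pair directly against given_cubes, instead of first building a per-color maxima table and then scanning it.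
import Mathlib
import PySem

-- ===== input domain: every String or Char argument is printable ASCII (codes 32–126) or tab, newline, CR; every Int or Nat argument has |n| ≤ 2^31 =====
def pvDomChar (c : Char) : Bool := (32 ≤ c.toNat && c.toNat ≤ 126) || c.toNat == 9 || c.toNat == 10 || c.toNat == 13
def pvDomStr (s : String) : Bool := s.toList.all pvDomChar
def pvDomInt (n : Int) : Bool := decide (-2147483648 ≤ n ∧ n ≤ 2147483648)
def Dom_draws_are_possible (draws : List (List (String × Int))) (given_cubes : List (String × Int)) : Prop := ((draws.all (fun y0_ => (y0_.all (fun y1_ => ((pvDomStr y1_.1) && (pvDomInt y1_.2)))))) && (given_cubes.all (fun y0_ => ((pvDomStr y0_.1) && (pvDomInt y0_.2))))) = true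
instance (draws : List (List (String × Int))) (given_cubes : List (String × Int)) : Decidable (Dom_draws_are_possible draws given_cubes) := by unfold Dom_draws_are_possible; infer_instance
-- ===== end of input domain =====

-- B replaces A's two-phase maxima-dict construction by one fused pass over the pairs; objective: simpler.

-- ===== PORT A =====
-- inner loop body of get_color_maxima_from_draws: 'if count > maxima.get(color, 0): maxima[color] = count'
def pvUpd (m : PySem.Dict String Int) (p : String × Int) : PySem.Dict String Int :=
  if p.2 > m.getD p.1 0 then m.insert p.1 p.2 else m

-- get_color_maxima_from_draws: nested for-loops accumulating the maxima dict
def get_color_maxima_from_draws (draws : List (List (String × Int))) : PySem.Dict String Int :=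
  draws.foldl (fun m draw => draw.foldl pvUpd m) PySem.Dict.empty

-- the final loop of draws_are_possible with its early 'return False'
def pvCheckLoop (items : List (String × Int)) (given_cubes : List (String × Int)) : Bool :=
  match items with
  | [] => true
  | (color, count) :: rest =>
      if count > (PySem.Dict.mk given_cubes).getD color 0 then false
      else pvCheckLoop rest given_cubes

def draws_are_possible (draws : List (List (String × Int))) (given_cubes : List (String × Int)) : Bool :=
  pvCheckLoop (get_color_maxima_from_draws draws).items given_cubes

-- ===== PORT B =====
def draws_are_possible_alt (draws : List (List (String × Int))) (given_cubes : List (String × Int)) : Bool :=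
  draws.all (fun draw => draw.all (fun p =>
    !(decide (0 < p.2)) || decide (p.2 ≤ (PySem.Dict.mk given_cubes).getD p.1 0)))

-- ===== PRECONDITION & SPEC =====
def Spec_draws_are_possible (draws : List (List (String × Int))) (given_cubes : List (String × Int)) (out : Bool) : Prop := out = draws_are_possible_alt draws given_cubes
instance (draws : List (List (String × Int))) (given_cubes : List (String × Int)) (out : Bool) : Decidable (Spec_draws_are_possible draws given_cubes out) := by unfold Spec_draws_are_possible; infer_instance

-- ===== CLAIM (what is proved, stated in full; the proofs are below) =====
def Claim_equal_draws_are_possible : Prop := ∀ (draws : List (List (String × Int))) (given_cubes : List (String × Int)), Dom_draws_are_possible draws given_cubes → Spec_draws_are_possible draws given_cubes (draws_are_possible draws given_cubes)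

-- ===== LEMMAS AND PROOFS =====

-- "every maxima entry fits in given_cubes" as a Bool over a dict
def pvOK (g : List (String × Int)) (d : PySem.Dict String Int) : Bool :=
  d.items.all (fun p => decide (p.2 ≤ (PySem.Dict.mk g).getD p.1 0))

-- "every maxima entry is positive" (invariant of A's construction)
def pvPos (d : PySem.Dict String Int) : Bool :=
  d.items.all (fun p => decide (0 < p.2))

-- B's per-pair condition
def pvCond (g : List (String × Int)) (p : String × Int) : Bool :=
  !(decide (0 < p.2)) || decide (p.2 ≤ (PySem.Dict.mk g).getD p.1 0)

lemma pvCheckLoop_eq_all (l g : List (String × Int)) :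
    pvCheckLoop l g = l.all (fun p => decide (p.2 ≤ (PySem.Dict.mk g).getD p.1 0)) := by
  induction l with
  | nil => rfl
  | cons p rest ih =>
      obtain ⟨c, n⟩ := p
      simp only [pvCheckLoop, List.all_cons, ih]
      split_ifs with h
      · simp [h]
      · simp [not_lt.mp h]

lemma pvPos_getD_nonneg (m : PySem.Dict String Int) (c : String)
    (hp : pvPos m = true) : 0 ≤ m.getD c 0 := by
  rcases hg : m.get? c with _ | v
  · rw [PySem.Dict.getD_eq_get?_getD, hg]; rfl
  · have hmem := PySem.Dict.mem_items_of_get?_eq_some m hg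
    have := (List.all_eq_true.mp hp) _ hmem
    rw [PySem.Dict.getD_eq_get?_getD, hg]
    simpa using le_of_lt (by simpa using this)

lemma pvUpd_step (g : List (String × Int)) (m : PySem.Dict String Int) (p : String × Int)
    (hnd : m.keys.Nodup) (hp : pvPos m = true) :
    (pvUpd m p).keys.Nodup ∧ pvPos (pvUpd m p) = true ∧
      pvOK g (pvUpd m p) = (pvOK g m && pvCond g p) := by
  obtain ⟨c, n⟩ := p
  by_cases h : n > m.getD c 0
  · have hpos : (0 : Int) < n := lt_of_le_of_lt (pvPos_getD_nonneg m c hp) h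
    have hupd : pvUpd m (c, n) = m.insert c n := by simp [pvUpd, h]
    rw [hupd]
    refine ⟨PySem.Dict.nodup_keys_insert m c n hnd, ?_, ?_⟩
    · -- all entries of the insert are positive
      unfold pvPos
      rw [List.all_eq_true]
      intro q hq
      rcases (PySem.Dict.mem_items_insert _ _ _ _).mp hq with hq | ⟨hq, _⟩
      · subst hq; simpa using hpos
      · exact (List.all_eq_true.mp hp) _ hq
    · -- OK (insert) = OK m && cond
      unfold pvOK pvCond
      by_cases hok : n ≤ (PySem.Dict.mk g).getD c 0
      · -- both sides say: all other entries fit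
        have hrhs : (!(decide (0 < n)) || decide (n ≤ (PySem.Dict.mk g).getD c 0)) = true := by
          simp [hok]
        rw [hrhs, Bool.and_true]
        apply Bool.eq_iff_iff.mpr
        simp only [List.all_eq_true]
        constructor
        · intro hi q hq
          by_cases hc : q.1 = c
          · -- the old entry at c is < n ≤ given
            have hv : m.getD q.1 0 = q.2 := by
              obtain ⟨q1, q2⟩ := q
              exact PySem.Dict.getD_of_mem_items m hq hnd 0
            have : q.2 < n := by rw [← hv, hc]; exact h
            simp only [decide_eq_true_eq] at *
            calc q.2 ≤ n := le_of_lt this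
              _ ≤ (PySem.Dict.mk g).getD c 0 := hok
              _ = (PySem.Dict.mk g).getD q.1 0 := by rw [hc]
          · exact hi q ((PySem.Dict.mem_items_insert _ _ _ _).mpr (Or.inr ⟨hq, hc⟩))
        · intro hi q hq
          rcases (PySem.Dict.mem_items_insert _ _ _ _).mp hq with hq | ⟨hq, _⟩
          · subst hq; simpa using hok
          · exact hi q hq
      · -- n does not fit: both sides false
        have : ¬ ((m.insert c n).items.all
            (fun p => decide (p.2 ≤ (PySem.Dict.mk g).getD p.1 0)) = true) := by
          rw [List.all_eq_true]
          intro hall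
          exact hok (by simpa using hall _ (PySem.Dict.mem_items_insert_self m c n))
        rw [Bool.eq_false_iff.mpr this]
        have : (!(decide (0 < n)) || decide (n ≤ (PySem.Dict.mk g).getD c 0)) = false := by
          simp [hok, hpos]
        rw [this, Bool.and_false]
  · -- count not above current maximum: dict unchanged, and the pair's condition is implied
    have hupd : pvUpd m (c, n) = m := by simp [pvUpd, h]
    rw [hupd]
    refine ⟨hnd, hp, ?_⟩
    unfold pvOK pvCond
    by_cases hok : pvOK g m = true
    · have hcond : (!(decide (0 < n)) || decide (n ≤ (PySem.Dict.mk g).getD c 0)) = true := by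
        by_cases hn : 0 < n
        · -- m contains c with value ≥ n, which fits, so n fits
          have hge : n ≤ m.getD c 0 := not_lt.mp h
          rcases hgc : m.get? c with _ | v
          · exfalso
            have : m.getD c 0 = 0 := by rw [PySem.Dict.getD_eq_get?_getD, hgc]; rfl
            omega
          · have hmem := PySem.Dict.mem_items_of_get?_eq_some m hgc
            have hv : m.getD c 0 = v := by rw [PySem.Dict.getD_eq_get?_getD, hgc]; rfl
            have hfit := (List.all_eq_true.mp (by unfold pvOK at hok; exact hok)) _ hmem
            simp only [Bool.or_eq_true, decide_eq_true_eq] at hfit ⊢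
            right; omega
        · simp [hn]
      unfold pvOK at hok
      rw [hok, hcond, Bool.true_and]
    · unfold pvOK at hok
      rw [Bool.eq_false_iff.mpr hok, Bool.false_and]

lemma pvInner_fold (g : List (String × Int)) (draw : List (String × Int))
    (m : PySem.Dict String Int) (hnd : m.keys.Nodup) (hp : pvPos m = true) :
    (draw.foldl pvUpd m).keys.Nodup ∧ pvPos (draw.foldl pvUpd m) = true ∧
      pvOK g (draw.foldl pvUpd m) = (pvOK g m && draw.all (pvCond g)) := by
  induction draw generalizing m with
  | nil => simp [hnd, hp]
  | cons p rest ih =>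
      obtain ⟨h1, h2, h3⟩ := pvUpd_step g m p hnd hp
      obtain ⟨k1, k2, k3⟩ := ih (pvUpd m p) h1 h2
      refine ⟨k1, k2, ?_⟩
      simp only [List.foldl_cons] at *
      rw [k3, h3, List.all_cons, Bool.and_assoc]

lemma pvOuter_fold (g : List (String × Int)) (draws : List (List (String × Int)))
    (m : PySem.Dict String Int) (hnd : m.keys.Nodup) (hp : pvPos m = true) :
    (draws.foldl (fun m draw => draw.foldl pvUpd m) m).keys.Nodup ∧
      pvPos (draws.foldl (fun m draw => draw.foldl pvUpd m) m) = true ∧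
      pvOK g (draws.foldl (fun m draw => draw.foldl pvUpd m) m)
        = (pvOK g m && draws.all (fun draw => draw.all (pvCond g))) := by
  induction draws generalizing m with
  | nil => simp [hnd, hp]
  | cons draw rest ih =>
      obtain ⟨h1, h2, h3⟩ := pvInner_fold g draw m hnd hp
      obtain ⟨k1, k2, k3⟩ := ih _ h1 h2
      refine ⟨k1, k2, ?_⟩
      simp only [List.foldl_cons] at *
      rw [k3, h3, List.all_cons, Bool.and_assoc]

-- ===== VERDICT (by name: the statement is the Claim_ definition above) =====
theorem draws_are_possible_spec : Claim_equal_draws_are_possible := by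
  intro draws g _
  unfold Spec_draws_are_possible draws_are_possible draws_are_possible_alt
    get_color_maxima_from_draws
  rw [pvCheckLoop_eq_all]
  have h := pvOuter_fold g draws PySem.Dict.empty (by simp) (by rfl)
  have : pvOK g (draws.foldl (fun m draw => draw.foldl pvUpd m) PySem.Dict.empty)
      = draws.all (fun draw => draw.all (pvCond g)) := by
    rw [h.2.2]; rfl
  unfold pvOK pvCond at this
  exact this
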